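-- pv_equiv track=rewrite | github.com/xenonyu/leetcode | dynamic planning/mirrorTree.py | uglyNum
-- ===== SOURCE A (Python) =====
-- def uglyNum(n):
--     keyDict = {1: True, 2: True, 3: True, 4: True, 5: True}
--
--     def recur(n):
--         if n in keyDict: return keyDict[n]
--         if n % 2:
--             res = recur(n // 2)
--             keyDict[n] = res
--             return res
--         elif n % 3:
--             res = recur(n // 3)
--             keyDict[n] = res
--             return res
--         elif n % 5:
--             res = recur(n // 5)
--             keyDict[n] = res
--             return res
--         keyDict[n] = False
--         return False
--
--     num, count = 1, 0
--     while True: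
--         if recur(num) == True: count += 1
--         if count == n: break
--         num += 1
--     return num
-- ===== SOURCE B (Python) =====
-- def uglyNum(n):
--     # iterative predicate replacing A's memoized recursion (no dict needed)
--     def ok(m):
--         while m > 5:
--             if m % 2:
--                 m //= 2
--             elif m % 3:
--                 m //= 3
--             elif m % 5:
--                 m //= 5
--             else:
--                 return False
--         return True
--
--     num, count = 1, 0
--     while True:
--         if ok(num):
--             count += 1
--         if count == n:
--             return num
--         num += 1
-- ===== Notes on version B (the rewrite author's own statement) =====
-- stated objective: simpler
-- what changed: Replaces A's memoized recursive predicate (closure dict keyDict + recursion) by a plain iterative division-chain loop with no memo table; the outer counting loop is kept.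
import Mathlib
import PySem

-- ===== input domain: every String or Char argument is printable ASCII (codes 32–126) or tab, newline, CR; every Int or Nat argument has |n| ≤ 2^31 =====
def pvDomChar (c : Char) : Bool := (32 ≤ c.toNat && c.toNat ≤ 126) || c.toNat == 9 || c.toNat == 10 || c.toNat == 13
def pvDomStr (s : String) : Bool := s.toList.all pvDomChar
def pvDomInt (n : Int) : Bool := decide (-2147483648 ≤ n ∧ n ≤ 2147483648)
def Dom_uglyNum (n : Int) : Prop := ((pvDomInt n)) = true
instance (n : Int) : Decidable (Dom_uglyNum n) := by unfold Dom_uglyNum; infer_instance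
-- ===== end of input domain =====

-- B replaces A's memoized recursive predicate by a plain iterative division loop (no dict); return values proved equal for every n (for n ≤ 0 neither Python returns — both while-loops are infinite there — and the fuel-aligned ports still agree).
-- Both 'while True' outer loops are ported with a fuel bound 2^(n.toNat+1), a pure totality device: the n-th qualifying
-- number is at most 2^n - 1 (the numbers 2^k - 1 all qualify), so the fuel is never exhausted for n ≥ 1.

-- ===== PORT A =====
-- recur(n) of A, threading the closure dict keyDict.  The 'm ≤ 0' guard is for totality only: at m = 0 it returns
-- exactly Python's final-else value (all three mods are zero there, so keyDict[0]=False), and m < 0 is never reached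
-- from the entry point (the chain from num ≥ 1 stays ≥ 1).
def recurA (d : PySem.Dict Int Bool) (m : Int) : Bool × PySem.Dict Int Bool :=
  match d.get? m with
  | some v => (v, d)
  | none =>
    if _hm : m ≤ 0 then (false, d.insert m false)
    else if PySem.Int.mod m 2 ≠ 0 then
      let r := recurA d (PySem.Int.floordiv m 2)
      (r.1, r.2.insert m r.1)
    else if PySem.Int.mod m 3 ≠ 0 then
      let r := recurA d (PySem.Int.floordiv m 3)
      (r.1, r.2.insert m r.1)
    else if PySem.Int.mod m 5 ≠ 0 then
      let r := recurA d (PySem.Int.floordiv m 5)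
      (r.1, r.2.insert m r.1)
    else (false, d.insert m false)
termination_by m.toNat
decreasing_by
  all_goals (rw [PySem.Int.floordiv_eq_ediv_of_pos (by omega)]; omega)

-- the 'while True: … if count == n: break; num += 1' loop of A (fuel-bounded; fuel exhaustion is unreachable for n ≥ 1)
def loopA (n : Int) : Nat → PySem.Dict Int Bool → Int → Int → Int
  | 0, _, num, _ => num
  | fuel+1, d, num, count =>
    let r := recurA d num
    let count' := if r.1 then count + 1 else count
    if count' = n then num else loopA n fuel r.2 (num + 1) count'

def uglyNum (n : Int) : Int :=
  loopA n (2 ^ (n.toNat + 1))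
    (PySem.Dict.ofList [(1, true), (2, true), (3, true), (4, true), (5, true)]) 1 0

-- ===== PORT B =====
-- B's iterative predicate ok(m): while m > 5 follow the same division chain; False only on a multiple of 30.
def okB (m : Int) : Bool :=
  if _hm : 5 < m then
    if PySem.Int.mod m 2 ≠ 0 then okB (PySem.Int.floordiv m 2)
    else if PySem.Int.mod m 3 ≠ 0 then okB (PySem.Int.floordiv m 3)
    else if PySem.Int.mod m 5 ≠ 0 then okB (PySem.Int.floordiv m 5)
    else false
  else true
termination_by m.toNat
decreasing_by
  all_goals (rw [PySem.Int.floordiv_eq_ediv_of_pos (by omega)]; omega)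

def loopB (n : Int) : Nat → Int → Int → Int
  | 0, num, _ => num
  | fuel+1, num, count =>
    let count' := if okB num then count + 1 else count
    if count' = n then num else loopB n fuel (num + 1) count'

def uglyNum_alt (n : Int) : Int := loopB n (2 ^ (n.toNat + 1)) 1 0

-- ===== PRECONDITION & SPEC =====
def Spec_uglyNum (n : Int) (out : Int) : Prop := out = uglyNum_alt n
instance (n : Int) (out : Int) : Decidable (Spec_uglyNum n out) := by unfold Spec_uglyNum; infer_instance

-- ===== CLAIM (what is proved, stated in full; the proofs are below) =====
def Claim_equal_uglyNum : Prop := ∀ (n : Int), Dom_uglyNum n → Spec_uglyNum n (uglyNum n)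

-- ===== LEMMAS AND PROOFS =====

-- the memo invariant: keys 1..5 are present and True, and every stored value is the value of B's predicate
def InvD (d : PySem.Dict Int Bool) : Prop :=
  (∀ k : Int, 1 ≤ k → k ≤ 5 → d.get? k = some true) ∧
  (∀ k v, d.get? k = some v → v = okB k)

theorem okB_base (m : Int) (h : m ≤ 5) : okB m = true := by
  rw [okB]; simp [show ¬ (5 < m) from by omega]

-- a dict miss at a key ≥ 1 means the key is ≥ 6 (keys 1..5 are always present)
theorem miss_ge6 (d : PySem.Dict Int Bool) (m : Int) (hd : InvD d) (hm : 1 ≤ m)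
    (hv : d.get? m = none) : 6 ≤ m := by
  by_contra h
  have := hd.1 m hm (by omega)
  rw [hv] at this
  simp at this

theorem insert_preserves (d' : PySem.Dict Int Bool) (m : Int) (b : Bool) (hm6 : 6 ≤ m)
    (hb : b = okB m) (inv : InvD d') : InvD (d'.insert m b) := by
  constructor
  · intro k hk1 hk5
    rw [PySem.Dict.get?_insert_of_ne d' b (by omega : k ≠ m)]
    exact inv.1 k hk1 hk5
  · intro k v h
    rw [PySem.Dict.get?_insert] at h
    split at h
    · next heq => cases h; rw [heq]; exact hb
    · exact inv.2 k v h

theorem recurA_eq (d : PySem.Dict Int Bool) (m : Int) (hm : 1 ≤ m) (hd : InvD d) :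
    (recurA d m).1 = okB m ∧ InvD (recurA d m).2 := by
  fun_induction recurA d m with
  | case1 m v hv => exact ⟨hd.2 m v hv, hd⟩
  | case2 m hv hm0 => exact absurd hm (by omega)
  | case3 m hv hm0 h2 r ih =>
    have hm6 : 6 ≤ m := miss_ge6 d m hd hm hv
    have hdiv : PySem.Int.floordiv m 2 = m / 2 := PySem.Int.floordiv_eq_ediv_of_pos (by omega)
    obtain ⟨e, inv'⟩ := ih (by rw [hdiv]; omega)
    have hok : okB m = okB (PySem.Int.floordiv m 2) := by
      rw [okB, dif_pos (show 5 < m by omega), if_pos h2]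
    exact ⟨e.trans hok.symm, insert_preserves _ _ _ hm6 (e.trans hok.symm) inv'⟩
  | case4 m hv hm0 h2 h3 r ih =>
    have hm6 : 6 ≤ m := miss_ge6 d m hd hm hv
    have hdiv : PySem.Int.floordiv m 3 = m / 3 := PySem.Int.floordiv_eq_ediv_of_pos (by omega)
    obtain ⟨e, inv'⟩ := ih (by rw [hdiv]; omega)
    have hok : okB m = okB (PySem.Int.floordiv m 3) := by
      rw [okB, dif_pos (show 5 < m by omega), if_neg h2, if_pos h3]
    exact ⟨e.trans hok.symm, insert_preserves _ _ _ hm6 (e.trans hok.symm) inv'⟩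
  | case5 m hv hm0 h2 h3 h5 r ih =>
    have hm6 : 6 ≤ m := miss_ge6 d m hd hm hv
    have hdiv : PySem.Int.floordiv m 5 = m / 5 := PySem.Int.floordiv_eq_ediv_of_pos (by omega)
    obtain ⟨e, inv'⟩ := ih (by rw [hdiv]; omega)
    have hok : okB m = okB (PySem.Int.floordiv m 5) := by
      rw [okB, dif_pos (show 5 < m by omega), if_neg h2, if_neg h3, if_pos h5]
    exact ⟨e.trans hok.symm, insert_preserves _ _ _ hm6 (e.trans hok.symm) inv'⟩
  | case6 m hv hm0 h2 h3 h5 =>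
    have hm6 : 6 ≤ m := miss_ge6 d m hd hm hv
    have hok : okB m = false := by
      rw [okB, dif_pos (show 5 < m by omega), if_neg h2, if_neg h3, if_neg h5]
    exact ⟨hok.symm, insert_preserves _ _ _ hm6 hok.symm hd⟩

theorem loop_eq (n : Int) (fuel : Nat) : ∀ (d : PySem.Dict Int Bool) (num count : Int),
    InvD d → 1 ≤ num → loopA n fuel d num count = loopB n fuel num count := by
  induction fuel with
  | zero => intro d num count _ _; rfl
  | succ f ih =>
    intro d num count hd hnum
    have h := recurA_eq d num hnum hd
    simp only [loopA, loopB, h.1]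
    split <;> split
    · rfl
    · exact ih _ _ _ h.2 (by omega)
    · rfl
    · exact ih _ _ _ h.2 (by omega)

theorem invD_init : InvD (PySem.Dict.ofList [(1, true), (2, true), (3, true), (4, true), (5, true)]) := by
  constructor
  · intro k hk1 hk5
    interval_cases k <;> decide
  · intro k v h
    by_cases h1 : k = 1
    · subst h1
      rw [show (PySem.Dict.ofList [((1:Int), true), (2, true), (3, true), (4, true), (5, true)]).get? 1 = some true from by decide] at h
      cases h; exact (okB_base 1 (by omega)).symm
    by_cases h2 : k = 2
    · subst h2
      rw [show (PySem.Dict.ofList [((1:Int), true), (2, true), (3, true), (4, true), (5, true)]).get? 2 = some true from by decide] at h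
      cases h; exact (okB_base 2 (by omega)).symm
    by_cases h3 : k = 3
    · subst h3
      rw [show (PySem.Dict.ofList [((1:Int), true), (2, true), (3, true), (4, true), (5, true)]).get? 3 = some true from by decide] at h
      cases h; exact (okB_base 3 (by omega)).symm
    by_cases h4 : k = 4
    · subst h4
      rw [show (PySem.Dict.ofList [((1:Int), true), (2, true), (3, true), (4, true), (5, true)]).get? 4 = some true from by decide] at h
      cases h; exact (okB_base 4 (by omega)).symm
    by_cases h5 : k = 5
    · subst h5
      rw [show (PySem.Dict.ofList [((1:Int), true), (2, true), (3, true), (4, true), (5, true)]).get? 5 = some true from by decide] at h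
      cases h; exact (okB_base 5 (by omega)).symm
    · exfalso
      rw [show (PySem.Dict.ofList [((1:Int), true), (2, true), (3, true), (4, true), (5, true)]) = PySem.Dict.mk [(1, true), (2, true), (3, true), (4, true), (5, true)] from by decide] at h
      simp [PySem.Dict.get?, beq_iff_eq, h1, h2, h3, h4, h5, Ne.symm] at h

-- ===== VERDICT (by name: the statement is the Claim_ definition above) =====
theorem uglyNum_spec : Claim_equal_uglyNum := by
  intro n _
  unfold Spec_uglyNum uglyNum uglyNum_alt
  exact loop_eq n _ _ 1 0 invD_init (by omega)
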